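-- pv_equiv track=rewrite | github.com/kevinpez/mikrotik-cursor-mcp | tests/integration/generate_comprehensive_tests.py | categorize_handlers
-- ===== SOURCE A (Python) =====
-- def categorize_handlers(handlers):
--     """Categorize handlers by operation type and category."""
--     categories = {}
--
--     for name in sorted(handlers.keys()):
--         # Extract category (second part of name)
--         parts = name.split('_')
--         if len(parts) < 2:
--             continue
--
--         operation = parts[1]  # list, get, create, remove, etc.
--         category = parts[2] if len(parts) > 2 else 'general'
--
--         key = f"{category}_{operation}"
--         if category not in categories:
--             categories[category] = {}
--         if operation not in categories[category]:
--             categories[category][operation] = []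
--         categories[category][operation].append(name)
--
--     return categories
-- ===== SOURCE B (Python) =====
-- def categorize_handlers(handlers):
--     """Categorize handlers by operation type and category."""
--     triples = []
--     for name in sorted(handlers.keys()):
--         parts = name.split('_')
--         if len(parts) >= 2:
--             category = parts[2] if len(parts) > 2 else 'general'
--             triples.append((category, parts[1], name))
--     result = {}
--     for category in dict.fromkeys(c for c, _, _ in triples):
--         mine = [(o, n) for c, o, n in triples if c == category]
--         result[category] = {o: [n for oo, n in mine if oo == o]
--                             for o in dict.fromkeys(o for o, _ in mine)}
--     return result
-- ===== Notes on version B (the rewrite author's own statement) =====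
-- stated objective: alternative
-- what changed: B replaces A's incremental mutation of a nested dict (guarded inserts plus append per name) by building a flat (category, operation, name) triple list once and then grouping it with ordered-dedup key lists and comprehension-style filters.
import Mathlib
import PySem

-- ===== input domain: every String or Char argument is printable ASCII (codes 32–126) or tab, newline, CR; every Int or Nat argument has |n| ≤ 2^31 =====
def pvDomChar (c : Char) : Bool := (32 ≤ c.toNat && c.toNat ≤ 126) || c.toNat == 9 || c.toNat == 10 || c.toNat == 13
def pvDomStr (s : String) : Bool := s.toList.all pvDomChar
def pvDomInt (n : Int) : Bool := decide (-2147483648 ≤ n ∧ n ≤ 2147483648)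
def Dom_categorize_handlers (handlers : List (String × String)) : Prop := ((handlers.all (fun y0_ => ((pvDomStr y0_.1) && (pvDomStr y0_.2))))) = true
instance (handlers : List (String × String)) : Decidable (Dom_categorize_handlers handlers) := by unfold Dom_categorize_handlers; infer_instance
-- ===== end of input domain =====

-- B replaces A's incremental nested-dict mutation by a flat (category, operation, name) triple
-- list that is then grouped with ordered-dedup key lists and comprehension-style filters (objective: alternative decomposition).

-- ===== PORT A =====
def categorize_handlers (handlers : List (String × String)) : List (String × List (String × List String)) :=
  let names := PySem.List.sorted (PySem.Dict.keys (PySem.Dict.ofList handlers)) (fun x => x) false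
  let categories := names.foldl
    (fun (cats : PySem.Dict String (PySem.Dict String (List String))) name =>
      let parts := (PySem.Str.split? name "_").getD []   -- sep = "_" ≠ "": split? is always `some`
      if parts.length < 2 then cats
      else
        let operation := parts.getD 1 ""                  -- parts[1]: in range since length ≥ 2
        let category := if parts.length > 2 then parts.getD 2 "" else "general"
        let cats' := if cats.contains category then cats else cats.insert category PySem.Dict.empty
        let inner := cats'.getD category PySem.Dict.empty
        let inner' := if inner.contains operation then inner else inner.insert operation []
        let inner'' := inner'.modify operation [] (fun l => l ++ [name])
        cats'.insert category inner'')
    PySem.Dict.empty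
  categories.items.map (fun p => (p.1, p.2.items))

-- ===== PORT B =====
def categorize_handlers_alt (handlers : List (String × String)) : List (String × List (String × List String)) :=
  let names := PySem.List.sorted (PySem.Dict.keys (PySem.Dict.ofList handlers)) (fun x => x) false
  let triples := names.foldl
    (fun (acc : List (String × String × String)) name =>
      let parts := (PySem.Str.split? name "_").getD []   -- sep = "_" ≠ "": split? is always `some`
      if parts.length ≥ 2 then
        acc ++ [((if parts.length > 2 then parts.getD 2 "" else "general"), parts.getD 1 "", name)]
      else acc) []
  (PySem.List.dedup (triples.map (fun t => t.1))).map (fun category =>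
    let mine := (triples.filter (fun t => t.1 == category)).map (fun t => (t.2.1, t.2.2))
    (category,
      (PySem.List.dedup (mine.map (fun q => q.1))).map (fun o =>
        (o, (mine.filter (fun q => q.1 == o)).map (fun q => q.2)))))

-- ===== PRECONDITION & SPEC =====
def Spec_categorize_handlers (handlers : List (String × String)) (out : List (String × List (String × List String))) : Prop := out = categorize_handlers_alt handlers
instance (handlers : List (String × String)) (out : List (String × List (String × List String))) : Decidable (Spec_categorize_handlers handlers out) := by unfold Spec_categorize_handlers; infer_instance

-- ===== CLAIM (what is proved, stated in full; the proofs are below) =====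
def Claim_equal_categorize_handlers : Prop := ∀ (handlers : List (String × String)), Dom_categorize_handlers handlers → Spec_categorize_handlers handlers (categorize_handlers handlers)

-- ===== LEMMAS AND PROOFS =====

/-- The (category, operation, name) triple a name with ≥ 2 underscore parts contributes. -/
def pvGT (name : String) : List (String × String × String) :=
  let parts := (PySem.Str.split? name "_").getD []
  if parts.length < 2 then []
  else [((if parts.length > 2 then parts.getD 2 "" else "general"), parts.getD 1 "", name)]

/-- One step of A's accumulation, on the triple level. -/
def pvStepT (d : PySem.Dict String (PySem.Dict String (List String)))
    (t : String × String × String) : PySem.Dict String (PySem.Dict String (List String)) :=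
  d.modify t.1 PySem.Dict.empty (fun inn => inn.modify t.2.1 [] (fun l => l ++ [t.2.2]))

lemma pv_B_triples (names : List String) (acc : List (String × String × String)) :
    names.foldl
      (fun acc name =>
        let parts := (PySem.Str.split? name "_").getD []
        if parts.length ≥ 2 then
          acc ++ [((if parts.length > 2 then parts.getD 2 "" else "general"), parts.getD 1 "", name)]
        else acc) acc
      = acc ++ names.flatMap pvGT := by
  induction names generalizing acc with
  | nil => simp
  | cons name rest ih =>
      simp only [List.foldl_cons, List.flatMap_cons, ih, pvGT]
      by_cases h : ((PySem.Str.split? name "_").getD []).length < 2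
      · simp [h, Nat.not_le.mpr h]
      · simp [h, Nat.le_of_not_lt (by omega)]
      
lemma pv_guard_inner (d : PySem.Dict String (List String)) (o name : String) :
    (if d.contains o = true then d else d.insert o []).modify o [] (fun l => l ++ [name])
      = d.modify o [] (fun l => l ++ [name]) := by
  by_cases h : d.contains o = true
  · rw [if_pos h]
  · rw [if_neg h]
    simp only [PySem.Dict.modify, PySem.Dict.getD_insert_self, PySem.Dict.insert_insert_self,
      PySem.Dict.getD_of_not_contains d ([] : List String) (by simpa using h)]

lemma pv_guard (cats : PySem.Dict String (PySem.Dict String (List String))) (c o name : String) :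
    (if cats.contains c = true then cats else cats.insert c PySem.Dict.empty).insert c
      ((if ((if cats.contains c = true then cats else cats.insert c PySem.Dict.empty).getD c PySem.Dict.empty).contains o = true
        then (if cats.contains c = true then cats else cats.insert c PySem.Dict.empty).getD c PySem.Dict.empty
        else ((if cats.contains c = true then cats else cats.insert c PySem.Dict.empty).getD c PySem.Dict.empty).insert o []).modify
          o [] (fun l => l ++ [name]))
      = cats.modify c PySem.Dict.empty (fun inn => inn.modify o [] (fun l => l ++ [name])) := by
  by_cases hcc : cats.contains c = true
  · rw [if_pos hcc, pv_guard_inner]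
    rfl
  · rw [if_neg hcc, PySem.Dict.getD_insert_self, pv_guard_inner, PySem.Dict.insert_insert_self]
    simp only [PySem.Dict.modify,
      PySem.Dict.getD_of_not_contains cats PySem.Dict.empty (by simpa using hcc)]

lemma pv_A_step (cats : PySem.Dict String (PySem.Dict String (List String))) (name : String) :
    (let parts := (PySem.Str.split? name "_").getD []
     if parts.length < 2 then cats
     else
       let operation := parts.getD 1 ""
       let category := if parts.length > 2 then parts.getD 2 "" else "general"
       let cats' := if cats.contains category then cats else cats.insert category PySem.Dict.empty
       let inner := cats'.getD category PySem.Dict.empty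
       let inner' := if inner.contains operation then inner else inner.insert operation []
       let inner'' := inner'.modify operation [] (fun l => l ++ [name])
       cats'.insert category inner'')
      = (pvGT name).foldl pvStepT cats := by
  simp only [pvGT]
  by_cases h : ((PySem.Str.split? name "_").getD []).length < 2
  · simp [h]
  · simp only [if_neg h, List.foldl_cons, List.foldl_nil, pvStepT]
    exact pv_guard cats _ _ name

lemma pv_A_fold (names : List String) (d : PySem.Dict String (PySem.Dict String (List String))) :
    names.foldl
      (fun cats name =>
        let parts := (PySem.Str.split? name "_").getD []
        if parts.length < 2 then cats
        else
          let operation := parts.getD 1 ""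
          let category := if parts.length > 2 then parts.getD 2 "" else "general"
          let cats' := if cats.contains category then cats else cats.insert category PySem.Dict.empty
          let inner := cats'.getD category PySem.Dict.empty
          let inner' := if inner.contains operation then inner else inner.insert operation []
          let inner'' := inner'.modify operation [] (fun l => l ++ [name])
          cats'.insert category inner'') d
      = (names.flatMap pvGT).foldl pvStepT d := by
  induction names generalizing d with
  | nil => rfl
  | cons name rest ih =>
      simp only [List.foldl_cons, List.flatMap_cons, List.foldl_append]
      rw [← pv_A_step d name]; exact ih _

lemma pv_getD_fold (ts : List (String × String × String))
    (d : PySem.Dict String (PySem.Dict String (List String))) (c : String) :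
    (ts.foldl pvStepT d).getD c PySem.Dict.empty
      = ((ts.filter (fun t => t.1 == c)).map (fun t => (t.2.1, t.2.2))).foldl
          (fun inn q => inn.modify q.1 [] (fun l => l ++ [q.2])) (d.getD c PySem.Dict.empty) := by
  induction ts generalizing d with
  | nil => rfl
  | cons t rest ih =>
      simp only [List.foldl_cons, List.filter_cons]
      by_cases h : t.1 = c
      · subst h
        simp [ih, pvStepT]
      · have hb : (t.1 == c) = false := beq_eq_false_iff_ne.mpr h
        simp only [hb, Bool.false_eq_true, if_false, ih, pvStepT, PySem.Dict.getD_modify]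
        rw [if_neg (fun hh => h hh.symm)]

lemma pv_main (ts : List (String × String × String)) :
    (ts.foldl pvStepT PySem.Dict.empty).items.map (fun p => (p.1, p.2.items))
      = (PySem.List.dedup (ts.map (fun t => t.1))).map (fun category =>
          let mine := (ts.filter (fun t => t.1 == category)).map (fun t => (t.2.1, t.2.2))
          (category,
            (PySem.List.dedup (mine.map (fun q => q.1))).map (fun o =>
              (o, (mine.filter (fun q => q.1 == o)).map (fun q => q.2))))) := by
  have hnd : (ts.foldl pvStepT PySem.Dict.empty).keys.Nodup := by
    have := PySem.Dict.nodup_keys_foldl_modify_key ts (fun t => t.1) PySem.Dict.empty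
      (fun _ t inn => inn.modify t.2.1 [] (fun l => l ++ [t.2.2])) PySem.Dict.empty
      (by simp [PySem.Dict.keys_empty])
    simpa [pvStepT] using this
  rw [PySem.Dict.items_eq_map_keys _ hnd PySem.Dict.empty]
  have hkeys : (ts.foldl pvStepT PySem.Dict.empty).keys = PySem.List.dedup (ts.map (fun t => t.1)) := by
    have := PySem.Dict.keys_foldl_modify_key ts (fun t => t.1) PySem.Dict.empty
      (fun _ t inn => inn.modify t.2.1 [] (fun l => l ++ [t.2.2])) PySem.Dict.empty
    simpa [pvStepT, PySem.Dict.keys_empty, PySem.List.dedup_eq_ofList, PySem.Set.update,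
      PySem.Set.ofList] using this
  rw [hkeys, List.map_map]
  refine List.map_congr_left (fun c _ => ?_)
  simp only [Function.comp]
  rw [pv_getD_fold]
  set mine := ((ts.filter (fun t => t.1 == c)).map (fun t => (t.2.1, t.2.2))) with hm
  have hinnd : (mine.foldl (fun inn q => inn.modify q.1 [] (fun l => l ++ [q.2]))
      (PySem.Dict.empty.getD c PySem.Dict.empty)).keys.Nodup := by
    have := PySem.Dict.nodup_keys_foldl_modify_key mine (fun q => q.1) []
      (fun _ q l => l ++ [q.2]) PySem.Dict.empty (by simp [PySem.Dict.keys_empty])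
    simpa [PySem.Dict.getD_empty] using this
  rw [PySem.Dict.items_eq_map_keys _ hinnd []]
  have hik : (mine.foldl (fun inn q => inn.modify q.1 [] (fun l => l ++ [q.2]))
      (PySem.Dict.empty.getD c PySem.Dict.empty)).keys = PySem.List.dedup (mine.map (fun q => q.1)) := by
    have := PySem.Dict.keys_foldl_modify_key mine (fun q => q.1) []
      (fun _ q l => l ++ [q.2]) PySem.Dict.empty
    simpa [PySem.Dict.getD_empty, PySem.Dict.keys_empty, PySem.List.dedup_eq_ofList,
      PySem.Set.update, PySem.Set.ofList] using this
  rw [hik]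
  refine congrArg _ (List.map_congr_left (fun o _ => ?_))
  have := PySem.Dict.getD_foldl_modify_append mine PySem.Dict.empty o
  simp only [PySem.Dict.getD_empty] at this ⊢
  rw [this]
  simp

-- ===== VERDICT (by name: the statement is the Claim_ definition above) =====
theorem categorize_handlers_spec : Claim_equal_categorize_handlers := by
  intro handlers _
  unfold Spec_categorize_handlers
  show categorize_handlers handlers = categorize_handlers_alt handlers
  simp only [categorize_handlers, categorize_handlers_alt]
  rw [pv_A_fold, pv_B_triples, List.nil_append, pv_main]
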